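-- pv_equiv track=rewrite | github.com/carloscadena/code-challenges | src/string_pyramid.py | watch_pyramid_from_above
-- ===== SOURCE A (Python) =====
-- def watch_pyramid_from_above(characters):
--     if characters:
--         if '\n' in characters:
--             characters = characters.replace("\n", "")
--         north = ''
--         south = ''
--         count = (len(characters) * 2) - 1
--         before = ''
--         if len(characters) == 1:
--             return characters
--         for i, char in enumerate(characters):
--             row = before + (char * count) + before[::-1] + '\n'
--             north += row
--             if i != len(characters) - 1:
--                 south = row + south
--             before += char
--             count -= 2
--         return north + south[:-1]
--     else:
--         return characters
-- ===== SOURCE B (Python) =====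
-- def watch_pyramid_from_above(characters):
--     if not characters:
--         return characters
--     if '\n' in characters:
--         characters = characters.replace("\n", "")
--     n = len(characters)
--     size = 2 * n - 1
--     ring = [min(j, size - 1 - j) for j in range(size)]
--     rows = ["".join(characters[min(m, ring[j])] for j in range(size))
--             for m in range(n)]
--     return "\n".join(rows[ring[i]] for i in range(size))
-- ===== Notes on version B (the rewrite author's own statement) =====
-- stated objective: alternative
-- what changed: B computes the pyramid as a (2n-1)x(2n-1) grid whose cell (i,j) is characters[min(i, j, size-1-i, size-1-j)] — via a precomputed ring-index table and the n distinct ring rows — and joins the looked-up rows, instead of A's loop that accumulates a growing prefix, builds each north row as prefix + run + reversed prefix, and mirrors rows into a south half.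
import Mathlib
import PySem

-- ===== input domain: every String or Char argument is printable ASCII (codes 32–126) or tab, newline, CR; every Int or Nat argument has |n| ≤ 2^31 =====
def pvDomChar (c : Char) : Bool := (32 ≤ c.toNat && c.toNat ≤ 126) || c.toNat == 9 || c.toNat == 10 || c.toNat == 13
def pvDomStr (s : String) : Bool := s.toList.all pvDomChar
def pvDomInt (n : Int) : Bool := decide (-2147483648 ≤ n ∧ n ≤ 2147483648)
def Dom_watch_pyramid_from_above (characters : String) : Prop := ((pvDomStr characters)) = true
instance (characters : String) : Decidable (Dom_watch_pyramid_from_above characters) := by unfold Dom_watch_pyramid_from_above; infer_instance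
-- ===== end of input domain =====

-- B rebuilds the pyramid as a direct grid formula (each cell from its ring distance to the border)
-- instead of A's accumulated prefix rows mirrored into a south half; objective: alternative (same output).

-- ===== PORT A =====
-- loop body of A's `for i, char in enumerate(characters)`; state = (north, south, count, before)
def pyrStep (cs : List Char) (st : List Char × List Char × Int × List Char) (ic : Int × Char) :
    List Char × List Char × Int × List Char :=
  -- row = before + (char * count) + before[::-1] + '\n'   (char * count = replicate; negative count → empty, as in Python)
  let row := st.2.2.2 ++ List.replicate (st.2.2.1).toNat ic.2
             ++ ((PySem.List.slice? st.2.2.2 none none (-1)).getD []) ++ ['\n']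
  (st.1 ++ row,
   if ic.1 ≠ PySem.List.len cs - 1 then row ++ st.2.1 else st.2.1,
   st.2.2.1 - 2,
   st.2.2.2 ++ [ic.2])

def watch_pyramid_from_above (characters : String) : String :=
  if characters.toList.isEmpty then characters
  else
    let cs := if PySem.Chars.isIn ['\n'] characters.toList
              then PySem.Chars.replace characters.toList ['\n'] []
              else characters.toList
    if PySem.List.len cs = 1 then String.ofList cs
    else
      let st := (PySem.List.enumerate cs 0).foldl (pyrStep cs)
        ([], [], 2 * PySem.List.len cs - 1, [])
      String.ofList (st.1 ++ PySem.List.slice st.2.1 none (some (-1)))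

-- ===== PORT B =====
def watch_pyramid_from_above_alt (characters : String) : String :=
  if characters.toList.isEmpty then characters
  else
    let cs := if PySem.Chars.isIn ['\n'] characters.toList
              then PySem.Chars.replace characters.toList ['\n'] []
              else characters.toList
    let n : Int := PySem.List.len cs
    let size : Int := 2 * n - 1
    let ring : List Int := (PySem.List.pyRange 0 size 1).map (fun j => min j (size - 1 - j))
    let rows : List (List Char) := (PySem.List.pyRange 0 n 1).map (fun m =>
      PySem.Chars.join []
        ((PySem.List.pyRange 0 size 1).map (fun j =>
          [PySem.List.pyGetD cs (min m (PySem.List.pyGetD ring j 0)) ' '])))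
    String.ofList (PySem.Chars.join ['\n']
      ((PySem.List.pyRange 0 size 1).map (fun i =>
        PySem.List.pyGetD rows (PySem.List.pyGetD ring i 0) [])))

-- ===== PRECONDITION & SPEC =====
def Spec_watch_pyramid_from_above (characters : String) (out : String) : Prop := out = watch_pyramid_from_above_alt characters
instance (characters : String) (out : String) : Decidable (Spec_watch_pyramid_from_above characters out) := by unfold Spec_watch_pyramid_from_above; infer_instance

-- ===== CLAIM (what is proved, stated in full; the proofs are below) =====
def Claim_equal_watch_pyramid_from_above : Prop := ∀ (characters : String), Dom_watch_pyramid_from_above characters → Spec_watch_pyramid_from_above characters (watch_pyramid_from_above characters)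

-- ===== LEMMAS AND PROOFS =====

-- row k of the pyramid (no trailing newline): k outer characters, the k-th character filling the middle
def rbRow (cs : List Char) (k : Nat) : List Char :=
  cs.take k ++ List.replicate (2 * cs.length - 1 - 2 * k) (cs.getD k ' ') ++ (cs.take k).reverse

-- rows k, k+1, …, n-1, each with its trailing newline
def rowsFrom (cs : List Char) (k : Nat) : List (List Char) :=
  (List.range (cs.length - k)).map (fun t => rbRow cs (k + t) ++ ['\n'])

lemma rowsFrom_cons (cs : List Char) (k : Nat) (hk : k < cs.length) :
    rowsFrom cs k = (rbRow cs k ++ ['\n']) :: rowsFrom cs (k + 1) := by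
  unfold rowsFrom
  have h : cs.length - k = (cs.length - (k + 1)) + 1 := by omega
  rw [h, List.range_succ_eq_map, List.map_cons, List.map_map]
  simp [Function.comp, Nat.add_comm, Nat.add_left_comm]

lemma foldA (cs : List Char) : ∀ (s p N S : List Char), cs = p ++ s →
    (PySem.List.enumerate s (p.length : Int)).foldl (pyrStep cs)
      (N, S, 2 * (cs.length : Int) - 1 - 2 * (p.length : Int), p)
    = (N ++ (rowsFrom cs p.length).flatten,
       ((rowsFrom cs p.length).dropLast).reverse.flatten ++ S,
       2 * (cs.length : Int) - 1 - 2 * (cs.length : Int), cs) := by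
  intro s
  induction s with
  | nil =>
    intro p N S h
    have hp : p = cs := by simpa using h.symm
    subst hp
    simp [PySem.List.enumerate_nil, rowsFrom]
  | cons c s' ih =>
    intro p N S h
    have hp : p.length < cs.length := by rw [h]; simp
    rw [PySem.List.enumerate_cons, List.foldl_cons]
    have hc : cs.getD p.length ' ' = c := by
      rw [h]
      simp [List.getD]
    have htake : cs.take p.length = p := by rw [h, List.take_left]
    have hrow : pyrStep cs (N, S, 2 * (cs.length : Int) - 1 - 2 * (p.length : Int), p) ((p.length : Int), c)
        = (N ++ (rbRow cs p.length ++ ['\n']),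
           if (p.length : Int) ≠ PySem.List.len cs - 1 then (rbRow cs p.length ++ ['\n']) ++ S else S,
           2 * (cs.length : Int) - 1 - 2 * (p.length : Int) - 2,
           p ++ [c]) := by
      unfold pyrStep
      simp only [PySem.List.slice?_none_none_neg_one, Option.getD_some]
      have hto : (2 * (cs.length : Int) - 1 - 2 * (p.length : Int)).toNat
          = 2 * cs.length - 1 - 2 * p.length := by omega
      rw [hto]
      simp only [rbRow, hc, htake, List.append_assoc]
    rw [hrow]
    have h' : cs = (p ++ [c]) ++ s' := by rw [h]; simp
    have ihx := ih (p ++ [c])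
      (N ++ (rbRow cs p.length ++ ['\n']))
      (if (p.length : Int) ≠ PySem.List.len cs - 1 then (rbRow cs p.length ++ ['\n']) ++ S else S) h'
    simp only [List.length_append, List.length_cons, List.length_nil, Nat.zero_add,
      Nat.cast_add, Nat.cast_one] at ihx
    have hcnt : 2 * (cs.length : Int) - 1 - 2 * (p.length : Int) - 2
        = 2 * (cs.length : Int) - 1 - 2 * ((p.length : Int) + 1) := by ring
    rw [hcnt, ihx]
    -- now compare the closed forms at p.length vs p.length + 1
    refine Prod.ext ?_ (Prod.ext ?_ rfl)
    · show N ++ (rbRow cs p.length ++ ['\n']) ++ (rowsFrom cs (p.length + 1)).flatten = _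
      rw [rowsFrom_cons cs p.length hp]
      simp [List.append_assoc]
    · show ((rowsFrom cs (p.length + 1)).dropLast).reverse.flatten ++ _ = _
      by_cases hlast : p.length = cs.length - 1
      · have hlen : cs.length = p.length + 1 + s'.length := by rw [h]; simp; omega
        have hs0 : s'.length = 0 := by omega
        have hrf : rowsFrom cs (p.length + 1) = [] := by
          unfold rowsFrom
          have : cs.length - (p.length + 1) = 0 := by omega
          rw [this]; simp
        have hcond : ¬((p.length : Int) ≠ PySem.List.len cs - 1) := by
          simp only [PySem.List.len_eq, ne_eq, not_not]
          omega
        rw [if_neg hcond, hrf, rowsFrom_cons cs p.length hp, hrf]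
        simp
      · have hplt : p.length + 1 < cs.length := by omega
        have hne : rowsFrom cs (p.length + 1) ≠ [] := by
          rw [rowsFrom_cons cs (p.length + 1) hplt]; simp
        have hcond : ((p.length : Int) ≠ PySem.List.len cs - 1) := by
          simp only [PySem.List.len_eq, ne_eq]
          omega
        rw [if_pos hcond, rowsFrom_cons cs p.length hp,
          List.dropLast_cons_of_ne_nil hne]
        simp [List.append_assoc]

-- map of getD over an initial range is take
lemma map_range_getD (cs : List Char) (m : Nat) (hm : m ≤ cs.length) :
    (List.range m).map (fun k => cs.getD k ' ') = cs.take m := by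
  induction m with
  | zero => simp
  | succ m ih =>
    rw [List.range_succ, List.map_append, ih (by omega), List.take_add_one]
    simp [List.getD, List.getElem?_eq_getElem (by omega : m < cs.length)]

-- mapping h over reversed indices is the reverse of mapping h
lemma map_range_rev {α : Type} (h : Nat → α) (m : Nat) :
    (List.range m).map (fun k => h (m - 1 - k)) = ((List.range m).map h).reverse := by
  apply List.ext_getElem
  · simp
  · intro k h1 h2
    simp only [List.getElem_map, List.getElem_range, List.getElem_reverse, List.length_map,
      List.length_range]

-- the j-scan of the grid row whose ring index is m is exactly rbRow cs m
lemma row_eq (cs : List Char) (m : Nat) (hm : m + 1 ≤ cs.length) :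
    (PySem.List.pyRange 0 (2 * (cs.length : Int) - 1) 1).map
      (fun j => PySem.List.pyGetD cs (min (m : Int) (min j (2 * (cs.length : Int) - 1 - 1 - j))) ' ')
    = rbRow cs m := by
  rw [PySem.List.pyRange_one_append 0 (m : Int) (2 * (cs.length : Int) - 1) (by omega) (by omega),
    PySem.List.pyRange_one_append (m : Int) (2 * (cs.length : Int) - 1 - (m : Int))
      (2 * (cs.length : Int) - 1) (by omega) (by omega),
    List.map_append, List.map_append]
  have h1 : (PySem.List.pyRange 0 (m : Int) 1).map
      (fun j => PySem.List.pyGetD cs (min (m : Int) (min j (2 * (cs.length : Int) - 1 - 1 - j))) ' ')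
      = cs.take m := by
    rw [List.map_congr_left (g := fun j => PySem.List.pyGetD cs j ' ')
      (by
        intro j hj
        rw [PySem.List.mem_pyRange_one] at hj
        congr 1
        omega)]
    rw [PySem.List.pyRange_one]
    simp only [sub_zero, Int.toNat_natCast, List.map_map, Function.comp_def, zero_add,
      PySem.List.pyGetD_natCast]
    exact map_range_getD cs m (by omega)
  have h2 : (PySem.List.pyRange (m : Int) (2 * (cs.length : Int) - 1 - (m : Int)) 1).map
      (fun j => PySem.List.pyGetD cs (min (m : Int) (min j (2 * (cs.length : Int) - 1 - 1 - j))) ' ')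
      = List.replicate (2 * cs.length - 1 - 2 * m) (cs.getD m ' ') := by
    rw [List.map_congr_left (g := fun _ => PySem.List.pyGetD cs (m : Int) ' ')
      (by
        intro j hj
        rw [PySem.List.mem_pyRange_one] at hj
        congr 1
        omega)]
    rw [List.map_const', PySem.List.length_pyRange_one, PySem.List.pyGetD_natCast]
    congr 1
    omega
  have h3 : (PySem.List.pyRange (2 * (cs.length : Int) - 1 - (m : Int)) (2 * (cs.length : Int) - 1) 1).map
      (fun j => PySem.List.pyGetD cs (min (m : Int) (min j (2 * (cs.length : Int) - 1 - 1 - j))) ' ')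
      = (cs.take m).reverse := by
    rw [List.map_congr_left (g := fun j => PySem.List.pyGetD cs (2 * (cs.length : Int) - 1 - 1 - j) ' ')
      (by
        intro j hj
        rw [PySem.List.mem_pyRange_one] at hj
        congr 1
        omega)]
    rw [PySem.List.pyRange_one]
    have hkt : ((2 * (cs.length : Int) - 1) - (2 * (cs.length : Int) - 1 - (m : Int))).toNat = m := by
      omega
    rw [hkt, List.map_map]
    rw [List.map_congr_left (g := fun k => cs.getD (m - 1 - k) ' ')
      (by
        intro k hk
        rw [List.mem_range] at hk
        simp only [Function.comp]
        have hx : 2 * (cs.length : Int) - 1 - 1 - (2 * (cs.length : Int) - 1 - (m : Int) + (k : Int))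
            = ((m - 1 - k : Nat) : Int) := by omega
        rw [hx, PySem.List.pyGetD_natCast])]
    rw [map_range_rev (fun t => cs.getD t ' ') m, map_range_getD cs m (by omega)]
  rw [h1, h2, h3]
  unfold rbRow
  rw [List.append_assoc]

lemma intercalate_cons_cons {α : Type} (sep a b : List α) (t : List (List α)) :
    List.intercalate sep (a :: b :: t) = a ++ (sep ++ List.intercalate sep (b :: t)) := by
  simp [List.intercalate]

-- flatten of rows-with-separator is intercalate plus a trailing separator
lemma flatten_rows {α : Type} (sep : List α) (zs : List (List α)) (hz : zs ≠ []) :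
    (zs.map (· ++ sep)).flatten = List.intercalate sep zs ++ sep := by
  induction zs with
  | nil => exact absurd rfl hz
  | cons a t ih =>
    cases t with
    | nil => simp [List.intercalate]
    | cons b t' =>
      rw [List.map_cons, List.flatten_cons, ih (by simp), intercalate_cons_cons]
      simp [List.append_assoc]

-- intercalate distributes over append of two nonempty lists
lemma intercalate_append_nonempty {α : Type} (sep : List α) (xs ys : List (List α))
    (hx : xs ≠ []) (hy : ys ≠ []) :
    List.intercalate sep (xs ++ ys) = List.intercalate sep xs ++ sep ++ List.intercalate sep ys := by
  induction xs with
  | nil => exact absurd rfl hx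
  | cons a t ih =>
    cases t with
    | nil =>
      cases ys with
      | nil => exact absurd rfl hy
      | cons b ys' =>
        rw [List.singleton_append, intercalate_cons_cons]
        simp [List.intercalate, List.append_assoc]
    | cons a' t' =>
      have h2 : List.intercalate sep ((a :: a' :: t') ++ ys)
          = a ++ (sep ++ List.intercalate sep ((a' :: t') ++ ys)) := by
        rw [List.cons_append, List.cons_append, intercalate_cons_cons, ← List.cons_append]
      rw [h2, ih (by simp), intercalate_cons_cons]
      simp [List.append_assoc]

-- B's list of grid rows (looked up through the ring table), reduced to rbRow form
lemma gridRows_eq (cs : List Char) (hn : 1 ≤ cs.length) :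
    (PySem.List.pyRange 0 (2 * (cs.length : Int) - 1) 1).map (fun i =>
      PySem.List.pyGetD
        ((PySem.List.pyRange 0 (cs.length : Int) 1).map (fun m =>
          PySem.Chars.join []
            ((PySem.List.pyRange 0 (2 * (cs.length : Int) - 1) 1).map (fun j =>
              [PySem.List.pyGetD cs
                (min m (PySem.List.pyGetD
                  ((PySem.List.pyRange 0 (2 * (cs.length : Int) - 1) 1).map
                    (fun j' => min j' (2 * (cs.length : Int) - 1 - 1 - j'))) j 0)) ' ']))))
        (PySem.List.pyGetD
          ((PySem.List.pyRange 0 (2 * (cs.length : Int) - 1) 1).map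
            (fun j' => min j' (2 * (cs.length : Int) - 1 - 1 - j'))) i 0) [])
    = (List.range cs.length).map (rbRow cs)
      ++ ((List.range (cs.length - 1)).map (rbRow cs)).reverse := by
  have hring : ∀ i : Int, 0 ≤ i → i < 2 * (cs.length : Int) - 1 →
      PySem.List.pyGetD
        ((PySem.List.pyRange 0 (2 * (cs.length : Int) - 1) 1).map
          (fun j' => min j' (2 * (cs.length : Int) - 1 - 1 - j'))) i 0
      = min i (2 * (cs.length : Int) - 1 - 1 - i) :=
    fun i h1 h2 => PySem.List.pyGetD_map_pyRange_of_nonneg _ _ _ _ h1 h2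
  have hrow : ∀ i ∈ PySem.List.pyRange 0 (2 * (cs.length : Int) - 1) 1,
      PySem.List.pyGetD
        ((PySem.List.pyRange 0 (cs.length : Int) 1).map (fun m =>
          PySem.Chars.join []
            ((PySem.List.pyRange 0 (2 * (cs.length : Int) - 1) 1).map (fun j =>
              [PySem.List.pyGetD cs
                (min m (PySem.List.pyGetD
                  ((PySem.List.pyRange 0 (2 * (cs.length : Int) - 1) 1).map
                    (fun j' => min j' (2 * (cs.length : Int) - 1 - 1 - j'))) j 0)) ' ']))))
        (PySem.List.pyGetD
          ((PySem.List.pyRange 0 (2 * (cs.length : Int) - 1) 1).map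
            (fun j' => min j' (2 * (cs.length : Int) - 1 - 1 - j'))) i 0) []
      = rbRow cs ((min i (2 * (cs.length : Int) - 1 - 1 - i)).toNat) := by
    intro i hi
    rw [PySem.List.mem_pyRange_one] at hi
    rw [hring i hi.1 hi.2]
    rw [PySem.List.pyGetD_map_pyRange_of_nonneg _ _ _ _
      (by omega : (0 : Int) ≤ min i (2 * (cs.length : Int) - 1 - 1 - i))
      (by omega : min i (2 * (cs.length : Int) - 1 - 1 - i) < (cs.length : Int))]
    have hmapmap : (PySem.List.pyRange 0 (2 * (cs.length : Int) - 1) 1).map (fun j =>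
          [PySem.List.pyGetD cs
            (min (min i (2 * (cs.length : Int) - 1 - 1 - i)) (PySem.List.pyGetD
              ((PySem.List.pyRange 0 (2 * (cs.length : Int) - 1) 1).map
                (fun j' => min j' (2 * (cs.length : Int) - 1 - 1 - j'))) j 0)) ' '])
        = ((PySem.List.pyRange 0 (2 * (cs.length : Int) - 1) 1).map (fun j =>
          PySem.List.pyGetD cs
            (min (min i (2 * (cs.length : Int) - 1 - 1 - i)) (PySem.List.pyGetD
              ((PySem.List.pyRange 0 (2 * (cs.length : Int) - 1) 1).map
                (fun j' => min j' (2 * (cs.length : Int) - 1 - 1 - j'))) j 0)) ' ')).map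
          (fun c => [c]) := by
      rw [List.map_map]; rfl
    rw [hmapmap, PySem.Chars.join_nil_singletons]
    rw [List.map_congr_left
      (g := fun j => PySem.List.pyGetD cs
        (min ((((min i (2 * (cs.length : Int) - 1 - 1 - i)).toNat : Nat)) : Int)
          (min j (2 * (cs.length : Int) - 1 - 1 - j))) ' ')
      (by
        intro j hj
        rw [PySem.List.mem_pyRange_one] at hj
        rw [hring j hj.1 hj.2]
        congr 1
        omega)]
    exact row_eq cs _ (by omega)
  rw [List.map_congr_left hrow, PySem.List.pyRange_one]
  have hsz : ((2 * (cs.length : Int) - 1) - 0).toNat = 2 * cs.length - 1 := by omega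
  rw [hsz, List.map_map]
  have hsplit : 2 * cs.length - 1 = cs.length + (cs.length - 1) := by omega
  rw [hsplit, List.range_add, List.map_append]
  congr 1
  · apply List.map_congr_left
    intro i hi
    rw [List.mem_range] at hi
    simp only [Function.comp]
    congr 1
    omega
  · rw [List.map_map]
    rw [List.map_congr_left (g := fun k => rbRow cs (cs.length - 1 - 1 - k))
      (by
        intro k hk
        rw [List.mem_range] at hk
        simp only [Function.comp]
        congr 1
        omega)]
    exact map_range_rev (rbRow cs) (cs.length - 1)

lemma rowsFrom_zero (cs : List Char) :
    rowsFrom cs 0 = ((List.range cs.length).map (rbRow cs)).map (· ++ ['\n']) := by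
  unfold rowsFrom
  simp [List.map_map, Function.comp]

lemma rowsFrom_zero_dropLast (cs : List Char) (h : 1 ≤ cs.length) :
    (rowsFrom cs 0).dropLast = ((List.range (cs.length - 1)).map (rbRow cs)).map (· ++ ['\n']) := by
  rw [rowsFrom_zero]
  conv_lhs => rw [show cs.length = (cs.length - 1) + 1 from by omega, List.range_succ]
  rw [List.map_append, List.map_append]
  simp

-- the common core: for the cleaned character list, A's branch equals B's grid
lemma pyramid_core (cs : List Char) :
    (if PySem.List.len cs = 1 then String.ofList cs
     else
       let st := (PySem.List.enumerate cs 0).foldl (pyrStep cs)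
         ([], [], 2 * PySem.List.len cs - 1, [])
       String.ofList (st.1 ++ PySem.List.slice st.2.1 none (some (-1))))
    = String.ofList (PySem.Chars.join ['\n']
        ((PySem.List.pyRange 0 (2 * PySem.List.len cs - 1) 1).map (fun i =>
          PySem.List.pyGetD
            ((PySem.List.pyRange 0 (PySem.List.len cs) 1).map (fun m =>
              PySem.Chars.join []
                ((PySem.List.pyRange 0 (2 * PySem.List.len cs - 1) 1).map (fun j =>
                  [PySem.List.pyGetD cs
                    (min m (PySem.List.pyGetD
                      ((PySem.List.pyRange 0 (2 * PySem.List.len cs - 1) 1).map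
                        (fun j' => min j' (2 * PySem.List.len cs - 1 - 1 - j'))) j 0)) ' ']))))
            (PySem.List.pyGetD
              ((PySem.List.pyRange 0 (2 * PySem.List.len cs - 1) 1).map
                (fun j' => min j' (2 * PySem.List.len cs - 1 - 1 - j'))) i 0) []))) := by
  simp only [PySem.List.len_eq]
  by_cases h1 : (cs.length : Int) = 1
  · rw [if_pos h1]
    have hn : cs.length = 1 := by omega
    rw [gridRows_eq cs (by omega)]
    obtain ⟨c, hc⟩ := List.length_eq_one_iff.mp hn
    subst hc
    simp [PySem.Chars.join, List.intercalate, rbRow, List.getD]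
  · rw [if_neg h1]
    by_cases hz : cs.length = 0
    · have hcs : cs = [] := List.length_eq_zero_iff.mp hz
      subst hcs
      simp [PySem.List.enumerate_nil, PySem.List.slice_to_neg_one,
        PySem.Chars.join, List.intercalate]
    · have hn2 : 2 ≤ cs.length := by omega
      have hf := foldA cs cs [] [] [] (by simp)
      simp only [List.length_nil, Nat.cast_zero, mul_zero, sub_zero] at hf
      rw [hf]
      simp only [List.append_nil, List.nil_append]
      rw [PySem.List.slice_to_neg_one, gridRows_eq cs (by omega)]
      rw [rowsFrom_zero_dropLast cs (by omega), rowsFrom_zero]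
      rw [← List.map_reverse]
      have hx : (List.range cs.length).map (rbRow cs) ≠ [] := by
        apply List.ne_nil_of_length_pos
        simp only [List.length_map, List.length_range]
        omega
      have hy : (((List.range (cs.length - 1)).map (rbRow cs)).reverse : List (List Char)) ≠ [] := by
        apply List.ne_nil_of_length_pos
        simp only [List.length_reverse, List.length_map, List.length_range]
        omega
      rw [flatten_rows ['\n'] _ hx, flatten_rows ['\n'] _ hy, List.dropLast_concat,
        show PySem.Chars.join ['\n'] = List.intercalate ['\n'] from rfl,
        intercalate_append_nonempty ['\n'] _ _ hx hy]

-- ===== VERDICT (by name: the statement is the Claim_ definition above) =====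
theorem watch_pyramid_from_above_spec : Claim_equal_watch_pyramid_from_above := by
  unfold Claim_equal_watch_pyramid_from_above
  intro characters _
  unfold Spec_watch_pyramid_from_above watch_pyramid_from_above watch_pyramid_from_above_alt
  by_cases he : characters.toList.isEmpty = true
  · rw [if_pos he, if_pos he]
  · rw [if_neg he, if_neg he]
    exact pyramid_core (if PySem.Chars.isIn ['\n'] characters.toList
      then PySem.Chars.replace characters.toList ['\n'] [] else characters.toList)
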